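-- pv_equiv track=rewrite | github.com/whitealex95/autorigging-bipedal | utils/misc/joint_tree_util.py | makedepth
-- ===== SOURCE A (Python) =====
-- def makedepth(child):
--     def makedepth_rec(child, depth, node):
--         for x in child[node]:
--             depth[x] = depth[node] + 1
--         for x in child[node]:
--             makedepth_rec(child, depth, x)
--         return
--     depth = [0 for x in range(len(child))]
--     root = 0
--     makedepth_rec(child, depth, root)
--     return depth
-- ===== SOURCE B (Python) =====
-- def makedepth(child):
--     # Iterative DFS with an explicit stack instead of the nested recursive helper.
--     # Children are pushed in reverse so they are popped in order: the writes to
--     # depth happen in exactly the same order as A's recursion.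
--     depth = [0] * len(child)
--     stack = [0]
--     while stack:
--         node = stack.pop()
--         for x in child[node]:
--             depth[x] = depth[node] + 1
--         for x in reversed(child[node]):
--             stack.append(x)
--     return depth
-- ===== Notes on version B (the rewrite author's own statement) =====
-- stated objective: idiomatic
-- what changed: The nested recursive DFS helper is replaced by an iterative DFS over an explicit stack (pop a node, write its children's depths, push the children in reverse so they are popped in order), removing the inner function and the recursion-depth limit while performing exactly the same sequence of writes as A.
import Mathlib
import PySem

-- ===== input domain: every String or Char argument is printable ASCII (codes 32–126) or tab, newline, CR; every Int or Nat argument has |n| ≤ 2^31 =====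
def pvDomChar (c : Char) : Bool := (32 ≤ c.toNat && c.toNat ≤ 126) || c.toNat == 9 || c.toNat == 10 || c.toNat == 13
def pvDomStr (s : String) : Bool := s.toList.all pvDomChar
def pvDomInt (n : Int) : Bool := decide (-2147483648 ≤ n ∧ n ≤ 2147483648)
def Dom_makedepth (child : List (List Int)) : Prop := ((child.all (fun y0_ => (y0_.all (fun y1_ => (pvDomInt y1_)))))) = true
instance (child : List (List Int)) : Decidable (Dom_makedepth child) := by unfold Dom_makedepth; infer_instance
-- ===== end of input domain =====

-- B replaces A's nested recursive DFS helper by an iterative DFS with an explicit stack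
-- (children pushed in reverse, so the writes to depth happen in A's exact order); same O(n+m) cost.

-- shared totalization budget for the two loops below: it only makes them total
-- (it is never exhausted on an input the claim admits)
def pvFuel (child : List (List Int)) : Nat :=
  (child.flatten.length + child.length + 2) ^ (child.length + 2)

-- ===== PORT A =====
-- for x in child[node]: depth[x] = depth[node] + 1   (reads depth[node] each iteration, as Python does)
def mdWriteKids (cs : List Int) (depth : List Int) (node : Int) : Option (List Int) :=
  match cs with
  | [] => some depth
  | x :: rest =>
    match PySem.List.pyGet? depth node with
    | none => none
    | some dn =>
      match PySem.List.pySet? depth x (dn + 1) with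
      | none => none
      | some d2 => mdWriteKids rest d2 node

mutual
-- makedepth_rec(child, depth, node); the result also carries the remaining fuel
def mdRec (fuel : Nat) (child : List (List Int)) (depth : List Int) (node : Int) :
    Option {p : Nat × List Int // p.1 < fuel} :=
  match fuel with
  | 0 => none
  | f + 1 =>
    match PySem.List.pyGet? child node with
    | none => none
    | some cs =>
      match mdWriteKids cs depth node with
      | none => none
      | some d1 =>
        match mdRecKids f child d1 cs with
        | none => none
        | some q => some ⟨q.val, by have := q.property; omega⟩
termination_by (fuel, 0)

-- for x in child[node]: makedepth_rec(child, depth, x)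
def mdRecKids (fuel : Nat) (child : List (List Int)) (depth : List Int) (cs : List Int) :
    Option {p : Nat × List Int // p.1 ≤ fuel} :=
  match cs with
  | [] => some ⟨(fuel, depth), le_refl _⟩
  | x :: rest =>
    match mdRec fuel child depth x with
    | none => none
    | some q =>
      match mdRecKids q.val.1 child q.val.2 rest with
      | none => none
      | some r => some ⟨r.val, by have h1 := q.property; have h2 := r.property; omega⟩
termination_by (fuel, cs.length + 1)
end

def makedepth (child : List (List Int)) : List Int :=
  let depth := List.replicate child.length (0 : Int)
  match mdRec (pvFuel child) child depth 0 with
  | some q => q.val.2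
  | none => []    -- Python raises here; unreachable under Pre_makedepth

-- ===== PORT B =====
-- for x in child[node]: depth[x] = depth[node] + 1
def altWrite (cs : List Int) (depth : List Int) (node : Int) : Option (List Int) :=
  match cs with
  | [] => some depth
  | x :: rest =>
    match PySem.List.pyGet? depth node with
    | none => none
    | some dn =>
      match PySem.List.pySet? depth x (dn + 1) with
      | none => none
      | some d2 => altWrite rest d2 node

-- while stack: node = stack.pop(); write children; push children reversed
def altLoop (fuel : Nat) (child : List (List Int)) (depth : List Int) (stack : List Int) :
    Option (List Int) :=
  match stack with
  | [] => some depth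
  | _ :: _ =>
    match fuel with
    | 0 => none
    | f + 1 =>
      match PySem.List.pop? stack (-1) with
      | none => none
      | some (node, rest) =>
        match PySem.List.pyGet? child node with
        | none => none
        | some cs =>
          match altWrite cs depth node with
          | none => none
          | some d1 => altLoop f child d1 (rest ++ cs.reverse)

def makedepth_alt (child : List (List Int)) : List Int :=
  match altLoop (pvFuel child) child (List.replicate child.length (0 : Int)) [0] with
  | some d => d
  | none => []    -- Python raises here; unreachable under Pre_makedepth

-- ===== PRECONDITION & SPEC =====
-- helpers for Pre_: the nodes reachable from the root, along in-range (possibly negative,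
-- Python-style) child indices
def pvNorm (n : Nat) (x : Int) : Nat := if x < 0 then (x + n).toNat else x.toNat

def pvSuccs (child : List (List Int)) (j : Nat) : List Nat :=
  ((child.getD j []).filter
      (fun x => decide (-(child.length : Int) ≤ x ∧ x < (child.length : Int)))).map
    (pvNorm child.length)

def pvGrow (child : List (List Int)) (s : List Nat) : List Nat :=
  PySem.List.dedup (s ++ s.flatMap (pvSuccs child))

def pvClosure (child : List (List Int)) : Nat → List Nat → List Nat
  | 0, s => s
  | k + 1, s => pvClosure child k (pvGrow child s)

def pvReach (child : List (List Int)) (start : List Nat) : List Nat :=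
  pvClosure child child.length start

-- Pre_ is A's real domain: the list is nonempty, every row reachable from node 0 holds only
-- in-range (possibly negative) indices, and the reachable subgraph has no cycle; outside it
-- A raises IndexError or RecursionError (and the ports return their unreachable default)
def Pre_makedepth (child : List (List Int)) : Prop :=
  child ≠ [] ∧
  ∀ j ∈ pvReach child [0],
    (∀ x ∈ child.getD j [], -(child.length : Int) ≤ x ∧ x < (child.length : Int)) ∧
    j ∉ pvReach child (pvSuccs child j)
instance (child : List (List Int)) : Decidable (Pre_makedepth child) := by
  unfold Pre_makedepth; infer_instance

def pvWitness_makedepth : List (List Int) := [[1, 2], [], [3], []]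

def Spec_makedepth (child : List (List Int)) (out : List Int) : Prop := out = makedepth_alt child
instance (child : List (List Int)) (out : List Int) : Decidable (Spec_makedepth child out) := by unfold Spec_makedepth; infer_instance

-- ===== CLAIM (what is proved, stated in full; the proofs are below) =====
def Claim_equal_makedepth : Prop := ∀ (child : List (List Int)), Dom_makedepth child → Pre_makedepth child → Spec_makedepth child (makedepth child)

-- ===== LEMMAS AND PROOFS =====

theorem altWrite_eq (cs : List Int) (d : List Int) (node : Int) :
    altWrite cs d node = mdWriteKids cs d node := by
  induction cs generalizing d with
  | nil => rfl
  | cons x rest ih =>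
    simp only [altWrite, mdWriteKids]
    cases PySem.List.pyGet? d node with
    | none => rfl
    | some dn =>
      dsimp only
      cases PySem.List.pySet? d x (dn + 1) with
      | none => rfl
      | some d2 => exact ih d2

theorem altLoop_nil (fuel : Nat) (C : List (List Int)) (d : List Int) :
    altLoop fuel C d [] = some d := by
  cases fuel <;> rfl

theorem altLoop_snoc (f : Nat) (C : List (List Int)) (d : List Int) (tail : List Int)
    (node : Int) :
    altLoop (f + 1) C d (tail ++ [node]) =
      match PySem.List.pyGet? C node with
      | none => none
      | some cs =>
        match altWrite cs d node with
        | none => none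
        | some d1 => altLoop f C d1 (tail ++ cs.reverse) := by
  obtain ⟨a, s', hs⟩ : ∃ a s', tail ++ [node] = a :: s' := by
    cases tail with
    | nil => exact ⟨node, [], rfl⟩
    | cons t ts => exact ⟨t, ts ++ [node], rfl⟩
  rw [hs]
  simp only [altLoop]
  rw [← hs, PySem.List.pop?_last tail node]

-- the bisimulation: A's recursion and B's explicit stack perform the same computation
theorem bisim :
    ∀ (fuel : Nat) (C : List (List Int)),
      (∀ (d : List Int) (node : Int) (tail : List Int),
        (mdRec fuel C d node = none → altLoop fuel C d (tail ++ [node]) = none) ∧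
        (∀ q, mdRec fuel C d node = some q →
          altLoop fuel C d (tail ++ [node]) = altLoop q.val.1 C q.val.2 tail)) ∧
      (∀ (d : List Int) (cs : List Int) (tail : List Int),
        (mdRecKids fuel C d cs = none → altLoop fuel C d (tail ++ cs.reverse) = none) ∧
        (∀ q, mdRecKids fuel C d cs = some q →
          altLoop fuel C d (tail ++ cs.reverse) = altLoop q.val.1 C q.val.2 tail)) := by
  intro fuel
  induction fuel using Nat.strong_induction_on with
  | _ fuel ih =>
    intro C
    have hL : ∀ (d : List Int) (node : Int) (tail : List Int),
        (mdRec fuel C d node = none → altLoop fuel C d (tail ++ [node]) = none) ∧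
        (∀ q, mdRec fuel C d node = some q →
          altLoop fuel C d (tail ++ [node]) = altLoop q.val.1 C q.val.2 tail) := by
      intro d node tail
      match fuel with
      | 0 =>
        refine ⟨fun _ => ?_, fun q hq => ?_⟩
        · obtain ⟨a, s', hs⟩ : ∃ a s', tail ++ [node] = a :: s' := by
            cases tail with
            | nil => exact ⟨node, [], rfl⟩
            | cons t ts => exact ⟨t, ts ++ [node], rfl⟩
          rw [hs]; rfl
        · exact absurd q.property (by omega)
      | f + 1 =>
        rw [altLoop_snoc]
        simp only [mdRec]
        cases hg : PySem.List.pyGet? C node with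
        | none => exact ⟨fun _ => rfl, fun q hq => by simp at hq⟩
        | some cs =>
          dsimp only
          rw [altWrite_eq]
          cases hw : mdWriteKids cs d node with
          | none => exact ⟨fun _ => rfl, fun q hq => by simp at hq⟩
          | some d1 =>
            dsimp only
            obtain ⟨hK1, hK2⟩ := ((ih f (by omega)) C).2 d1 cs tail
            cases hk : mdRecKids f C d1 cs with
            | none => exact ⟨fun _ => hK1 hk, fun q hq => by simp at hq⟩
            | some q0 =>
              refine ⟨fun h => by simp at h, fun q hq => ?_⟩
              have hv : q.val = q0.val := by
                simp only [Option.some.injEq] at hq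
                rw [← hq]
              rw [hv]
              exact hK2 q0 hk
    have hK : ∀ (d : List Int) (cs : List Int) (tail : List Int),
        (mdRecKids fuel C d cs = none → altLoop fuel C d (tail ++ cs.reverse) = none) ∧
        (∀ q, mdRecKids fuel C d cs = some q →
          altLoop fuel C d (tail ++ cs.reverse) = altLoop q.val.1 C q.val.2 tail) := by
      intro d cs tail
      induction cs generalizing d tail with
      | nil =>
        refine ⟨fun h => by simp [mdRecKids] at h, fun q hq => ?_⟩
        have hv : q.val = (fuel, d) := by
          simp only [mdRecKids, Option.some.injEq] at hq
          rw [← hq]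
        rw [hv]
        simp
      | cons x rest ihc =>
        simp only [mdRecKids]
        have hstack : tail ++ (x :: rest).reverse = (tail ++ rest.reverse) ++ [x] := by
          simp
        rw [hstack]
        obtain ⟨hL1, hL2⟩ := hL d x (tail ++ rest.reverse)
        cases hr : mdRec fuel C d x with
        | none => exact ⟨fun _ => hL1 hr, fun q hq => by simp at hq⟩
        | some q1 =>
          dsimp only
          have hB1 : altLoop fuel C d ((tail ++ rest.reverse) ++ [x]) =
              altLoop q1.val.1 C q1.val.2 (tail ++ rest.reverse) := hL2 q1 hr
          obtain ⟨hK1', hK2'⟩ := ((ih q1.val.1 (by have := q1.property; omega)) C).2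
            q1.val.2 rest tail
          cases hk2 : mdRecKids q1.val.1 C q1.val.2 rest with
          | none => exact ⟨fun _ => by rw [hB1]; exact hK1' hk2, fun q hq => by simp at hq⟩
          | some r =>
            refine ⟨fun h => by simp at h, fun q hq => ?_⟩
            have hv : q.val = r.val := by
              simp only [Option.some.injEq] at hq
              rw [← hq]
            rw [hv, hB1]
            exact hK2' r hk2
    exact ⟨hL, hK⟩

theorem main_eq (C : List (List Int)) : makedepth C = makedepth_alt C := by
  obtain ⟨hL1, hL2⟩ :=
    (bisim (pvFuel C) C).1 (List.replicate C.length (0 : Int)) 0 []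
  show (match mdRec (pvFuel C) C (List.replicate C.length (0 : Int)) 0 with
        | some q => q.val.2
        | none => []) = makedepth_alt C
  unfold makedepth_alt
  cases hA : mdRec (pvFuel C) C (List.replicate C.length (0 : Int)) 0 with
  | none =>
    have := hL1 hA
    simp only [List.nil_append] at this
    rw [this]
  | some q =>
    have := hL2 q hA
    simp only [List.nil_append] at this
    rw [this, altLoop_nil]

-- ===== VERDICT (by name: the statement is the Claim_ definition above) =====
theorem makedepth_spec : Claim_equal_makedepth := by
  intro child _ _
  exact main_eq child
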